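-- pv_equiv track=rewrite | github.com/chaobrain/saiunit | saiunit/_base_unit.py | _merge_display_parts
-- ===== SOURCE A (Python) =====
-- def _merge_display_parts(parts_a, parts_b):
--     """Merge two part-lists, combine same-name entries, drop zeros, sort."""
--     merged: dict[str, tuple] = {}
--     for name, disp, exp in list(parts_a) + list(parts_b):
--         if name in merged:
--             _, old_disp, old_exp = merged[name]
--             merged[name] = (name, disp, old_exp + exp)
--         else:
--             merged[name] = (name, disp, exp)
--     result = [(n, d, e) for n, d, e in merged.values() if e != 0]
--     # positive exponents first (alphabetical), then negative (alphabetical)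
--     result.sort(key=lambda x: (0 if x[2] > 0 else 1, x[0].lower()))
--     return result
-- ===== SOURCE B (Python) =====
-- def _merge_display_parts(parts_a, parts_b):
--     """Merge two part-lists by grouping: dedup names in first-occurrence order,
--     scan the concatenation once per name for total exponent and last display."""
--     combined = list(parts_a) + list(parts_b)
--     names = list(dict.fromkeys(t[0] for t in combined))
--     result = []
--     for n in names:
--         grp = [t for t in combined if t[0] == n]
--         exp = sum(t[2] for t in grp)
--         if exp != 0:
--             result.append((n, [t[1] for t in grp][-1], exp))
--     return sorted(result, key=lambda x: (0 if x[2] > 0 else 1, x[0].lower()))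
-- ===== Notes on version B (the rewrite author's own statement) =====
-- stated objective: alternative
-- what changed: Replaces the incremental dict accumulation with a group-by pass: dedup the names in first-occurrence order, then for each name scan the concatenation once for its total exponent and last display, instead of maintaining a mutable merged dict.
import Mathlib
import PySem

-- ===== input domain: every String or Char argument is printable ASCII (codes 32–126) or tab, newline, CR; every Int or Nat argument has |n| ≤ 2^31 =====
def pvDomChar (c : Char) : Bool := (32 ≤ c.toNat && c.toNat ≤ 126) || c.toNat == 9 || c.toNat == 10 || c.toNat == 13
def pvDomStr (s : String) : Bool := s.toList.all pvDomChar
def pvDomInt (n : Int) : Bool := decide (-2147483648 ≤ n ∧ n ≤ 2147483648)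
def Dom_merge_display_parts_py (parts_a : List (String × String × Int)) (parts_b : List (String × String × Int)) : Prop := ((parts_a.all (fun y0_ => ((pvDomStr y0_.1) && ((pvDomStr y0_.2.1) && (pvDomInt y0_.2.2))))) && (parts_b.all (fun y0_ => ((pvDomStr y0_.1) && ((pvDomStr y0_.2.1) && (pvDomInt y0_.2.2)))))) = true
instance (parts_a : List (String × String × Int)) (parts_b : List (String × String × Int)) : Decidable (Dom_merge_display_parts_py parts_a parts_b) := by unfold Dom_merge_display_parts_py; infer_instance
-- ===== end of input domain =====

-- B merges by grouping (ordered name dedup + one scan per name) instead of A's mutable dict accumulation; objective: alternative decomposition, same results.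

-- ===== PORT A =====
def merge_display_parts_py (parts_a : List (String × String × Int)) (parts_b : List (String × String × Int)) : List (String × String × Int) :=
  let merged : PySem.Dict String (String × String × Int) :=
    (parts_a ++ parts_b).foldl (fun d p =>
      if d.contains p.1 then
        -- key is present, so getD's default is never used (Python: merged[name])
        let old := d.getD p.1 (p.1, "", 0)
        d.insert p.1 (p.1, p.2.1, old.2.2 + p.2.2)
      else
        d.insert p.1 (p.1, p.2.1, p.2.2)) PySem.Dict.empty
  let result := merged.values.filter (fun x => x.2.2 != 0)
  PySem.List.sorted2 result (fun x => if x.2.2 > 0 then (0 : Int) else 1)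
    (fun x => PySem.Str.lower x.1) false

-- ===== PORT B =====
def merge_display_parts_py_alt (parts_a : List (String × String × Int)) (parts_b : List (String × String × Int)) : List (String × String × Int) :=
  let combined := parts_a ++ parts_b
  let names := PySem.List.dedup (combined.map (fun t => t.1))
  let result := names.foldl (fun acc n =>
    let grp := combined.filter (fun t => t.1 == n)
    let exp := (grp.map (fun t => t.2.2)).sum
    if exp != 0 then
      -- grp is nonempty for every n in names, so [-1] never raises
      match PySem.List.pyGet? (grp.map (fun t => t.2.1)) (-1) with
      | some d => acc ++ [(n, d, exp)]
      | none => acc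
    else acc) []
  PySem.List.sorted2 result (fun x => if x.2.2 > 0 then (0 : Int) else 1)
    (fun x => PySem.Str.lower x.1) false

-- ===== PRECONDITION & SPEC =====
def Spec_merge_display_parts_py (parts_a : List (String × String × Int)) (parts_b : List (String × String × Int)) (out : List (String × String × Int)) : Prop := out = merge_display_parts_py_alt parts_a parts_b
instance (parts_a : List (String × String × Int)) (parts_b : List (String × String × Int)) (out : List (String × String × Int)) : Decidable (Spec_merge_display_parts_py parts_a parts_b out) := by unfold Spec_merge_display_parts_py; infer_instance

-- ===== CLAIM (what is proved, stated in full; the proofs are below) =====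
def Claim_equal_merge_display_parts_py : Prop := ∀ (parts_a : List (String × String × Int)) (parts_b : List (String × String × Int)), Dom_merge_display_parts_py parts_a parts_b → Spec_merge_display_parts_py parts_a parts_b (merge_display_parts_py parts_a parts_b)

-- ===== LEMMAS AND PROOFS =====

-- abbreviations for the proof (used only below the claim block)
def pvNames (l : List (String × String × Int)) : List String :=
  PySem.Set.ofList (l.map (fun t => t.1))

def pvGrp (l : List (String × String × Int)) (n : String) : List (String × String × Int) :=
  l.filter (fun t => t.1 == n)

def pvSumE (l : List (String × String × Int)) (n : String) : Int :=
  ((pvGrp l n).map (fun t => t.2.2)).sum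

def pvLastD (l : List (String × String × Int)) (n : String) : String :=
  (((pvGrp l n).map (fun t => t.2.1)).getLast?).getD ""

def pvEntry (l : List (String × String × Int)) (n : String) : String × String × Int :=
  (n, pvLastD l n, pvSumE l n)

def pvFoldA (l : List (String × String × Int)) : PySem.Dict String (String × String × Int) :=
  l.foldl (fun d p =>
    if d.contains p.1 then
      let old := d.getD p.1 (p.1, "", 0)
      d.insert p.1 (p.1, p.2.1, old.2.2 + p.2.2)
    else
      d.insert p.1 (p.1, p.2.1, p.2.2)) PySem.Dict.empty

theorem pvNames_nodup (l : List (String × String × Int)) : (pvNames l).Nodup := by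
  rw [pvNames]; exact PySem.Set.nodup_ofList _

theorem pvMem_names {l : List (String × String × Int)} {n : String} :
    n ∈ pvNames l ↔ n ∈ l.map (fun t => t.1) := by
  simp [pvNames, PySem.Set.mem_ofList]

theorem pvGrp_append_self (l : List (String × String × Int)) (x : String × String × Int) :
    pvGrp (l ++ [x]) x.1 = pvGrp l x.1 ++ [x] := by
  simp [pvGrp, List.filter_append]

theorem pvGrp_append_ne (l : List (String × String × Int)) (x : String × String × Int)
    {n : String} (hx : n ≠ x.1) : pvGrp (l ++ [x]) n = pvGrp l n := by
  have hb : (x.1 == n) = false := by simpa using (Ne.symm hx)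
  simp [pvGrp, List.filter_append, hb]

theorem pvMain (l : List (String × String × Int)) :
    (pvFoldA l).items = (pvNames l).map (fun n => (n, pvEntry l n)) := by
  induction l using List.reverseRecOn with
  | nil => simp [pvFoldA, pvNames, PySem.Dict.empty]
  | append_singleton l x ih =>
    have hkeys : (pvFoldA l).keys = pvNames l := by
      simp [PySem.Dict.keys, ih, Function.comp_def]
    have hnd : (pvFoldA l).keys.Nodup := by
      rw [hkeys]; exact pvNames_nodup l
    have hfold : pvFoldA (l ++ [x]) =
        (if (pvFoldA l).contains x.1 then
          (pvFoldA l).insert x.1 (x.1, x.2.1, ((pvFoldA l).getD x.1 (x.1, "", 0)).2.2 + x.2.2)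
        else (pvFoldA l).insert x.1 (x.1, x.2.1, x.2.2)) := by
      simp [pvFoldA]
    have hcont : (pvFoldA l).contains x.1 = decide (x.1 ∈ pvNames l) := by
      rw [PySem.Dict.contains_eq_decide_mem_keys, hkeys]
    have hadd : pvNames (l ++ [x]) = PySem.Set.add (pvNames l) x.1 := by
      simp [pvNames, PySem.Set.ofList_append, PySem.Set.update_cons, PySem.Set.update_nil]
    by_cases hmem : x.1 ∈ pvNames l
    · -- existing key: overwrite in place
      have hcontT : (pvFoldA l).contains x.1 = true := by rw [hcont]; simpa
      have hgetD : (pvFoldA l).getD x.1 (x.1, "", 0) = pvEntry l x.1 :=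
        PySem.Dict.getD_of_mem_items _ (by rw [ih]; exact List.mem_map.2 ⟨x.1, hmem, rfl⟩) hnd _
      have hnames : pvNames (l ++ [x]) = pvNames l := by
        rw [hadd]; simp [PySem.Set.add, PySem.Set.contains, hmem]
      rw [hfold, if_pos hcontT, hgetD,
        PySem.Dict.items_insert_of_contains _ _ hcontT, ih, hnames, List.map_map]
      apply List.map_congr_left
      intro n hn
      by_cases hx : n = x.1
      · subst hx
        have hgrp := pvGrp_append_self l x
        simp [pvEntry, pvSumE, pvLastD, hgrp]
      · have hne : (n == x.1) = false := by simpa using hx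
        have hgrp := pvGrp_append_ne l x hx
        simp [pvEntry, pvSumE, pvLastD, hx, hgrp]
    · -- new key: append
      have hcontF : (pvFoldA l).contains x.1 = false := by rw [hcont]; simpa
      have hnames : pvNames (l ++ [x]) = pvNames l ++ [x.1] := by
        rw [hadd]; simp [PySem.Set.add, PySem.Set.contains, hmem]
      have hgrpnil : pvGrp l x.1 = [] := by
        rw [pvGrp, List.filter_eq_nil_iff]
        intro t ht hbeq
        exact hmem (pvMem_names.2 (List.mem_map.2 ⟨t, ht, by simpa using hbeq⟩))
      rw [hfold, if_neg (by simp [hcontF]),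
        PySem.Dict.items_insert_of_not_contains _ _ hcontF, ih, hnames, List.map_append]
      congr 1
      · apply List.map_congr_left
        intro n hn
        have hx : n ≠ x.1 := fun h => hmem (h ▸ hn)
        have hgrp := pvGrp_append_ne l x hx
        simp [pvEntry, pvSumE, pvLastD, hgrp]
      · have hgrp := pvGrp_append_self l x
        simp [pvEntry, pvSumE, pvLastD, hgrp, hgrpnil]

theorem pvGrp_ne_nil {l : List (String × String × Int)} {n : String} (hn : n ∈ pvNames l) :
    pvGrp l n ≠ [] := by
  rcases List.mem_map.1 (pvMem_names.1 hn) with ⟨t, ht, rfl⟩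
  intro hnil
  have : t ∈ pvGrp l t.1 := List.mem_filter.2 ⟨ht, by simp⟩
  simp [hnil] at this

-- B's loop body, for names that actually occur, appends exactly pvEntry
theorem pvB_result (l : List (String × String × Int)) :
    (pvNames l).foldl (fun acc n =>
      let grp := l.filter (fun t => t.1 == n)
      let exp := (grp.map (fun t => t.2.2)).sum
      if exp != 0 then
        match PySem.List.pyGet? (grp.map (fun t => t.2.1)) (-1) with
        | some d => acc ++ [(n, d, exp)]
        | none => acc
      else acc) [] =
    ((pvNames l).filter (fun n => pvSumE l n != 0)).map (pvEntry l) := by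
  rw [PySem.List.foldl_congr_mem (pvNames l) _
      (fun acc n => if pvSumE l n != 0 then acc ++ [pvEntry l n] else acc) []
      ?_]
  · exact PySem.List.foldl_append_if _ _ _ _
  · intro acc n hn
    have hne : pvGrp l n ≠ [] := pvGrp_ne_nil hn
    have hne' : (pvGrp l n).map (fun t => t.2.1) ≠ [] := by simpa using hne
    have hlen : 1 ≤ (pvGrp l n).length := List.length_pos_iff.2 hne
    have hget : PySem.List.pyGet? ((pvGrp l n).map (fun t => t.2.1)) (-1) =
        ((pvGrp l n).map (fun t => t.2.1)).getLast? := by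
      simp [PySem.List.pyGet?, PySem.List.pyIdx?, hlen, List.getLast?_eq_getElem?]
    rcases hlast : ((pvGrp l n).map (fun t => t.2.1)).getLast? with _ | y
    · exact absurd (List.getLast?_eq_none_iff.1 hlast) hne'
    · have hld : pvLastD l n = y := by simp [pvLastD, hlast]
      show (if ((((l.filter (fun t => t.1 == n))).map (fun t => t.2.2)).sum != 0) = true then _ else acc) = _
      rw [show l.filter (fun t => t.1 == n) = pvGrp l n from rfl]
      rw [hget, hlast]
      simp only [pvEntry, pvSumE, hld]

-- ===== VERDICT (by name: the statement is the Claim_ definition above) =====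
theorem merge_display_parts_py_spec : Claim_equal_merge_display_parts_py := by
  intro pa pb _hdom
  show merge_display_parts_py pa pb = merge_display_parts_py_alt pa pb
  have hA : merge_display_parts_py pa pb =
      PySem.List.sorted2 (((pvFoldA (pa ++ pb)).values).filter (fun x => x.2.2 != 0))
        (fun x => if x.2.2 > 0 then (0 : Int) else 1) (fun x => PySem.Str.lower x.1) false := rfl
  have hB : merge_display_parts_py_alt pa pb =
      PySem.List.sorted2 (((pvNames (pa ++ pb)).filter (fun n => pvSumE (pa ++ pb) n != 0)).map
          (pvEntry (pa ++ pb)))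
        (fun x => if x.2.2 > 0 then (0 : Int) else 1) (fun x => PySem.Str.lower x.1) false := by
    rw [merge_display_parts_py_alt]
    have hded : PySem.List.dedup ((pa ++ pb).map (fun t => t.1)) = pvNames (pa ++ pb) := by
      simp [pvNames]
    rw [hded, pvB_result]
  rw [hA, hB]
  congr 1
  have hvals : (pvFoldA (pa ++ pb)).values =
      (pvNames (pa ++ pb)).map (pvEntry (pa ++ pb)) := by
    show ((pvFoldA (pa ++ pb)).items).map (fun p => p.2) = _
    rw [pvMain, List.map_map]
    rfl
  rw [hvals, List.filter_map]
  rfl
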